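-- pv_equiv track=rewrite | github.com/workprinond/DS_-_Algo_TechInterview_Practise | Beginning/movies_on_flight.py | longestPair
-- ===== SOURCE A (Python) =====
-- def longestPair(ary, d):
--     '''
--     # case 1 - example input
--     >>> longestPair([90, 85, 75, 60, 120, 150, 125], 250)
--     [90, 125]
--     # case 2 - empty array
--     >>> longestPair([], 250)
--     []
--     # case 3 - all duplicates
--     >>> longestPair([90, 10, 80, 20, 70, 30, 60, 40, 50, 50], 130)
--     [10, 90]
--     # case 4 - short flight duration
--     >>> longestPair([90, 10, 80, 20, 70, 30, 60, 40, 50, 50], 5)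
--     []
--     '''
--     d = d - 30
--     ary = sorted(ary)
--     left, right = 0, len(ary) - 1
--     maxDuration = 0
--     # default maxPair value differs by desired return value
--     maxPair = [] # it could be None
--
--     while left < right:
--         curDuration = ary[left] + ary[right]
--         if curDuration <= d:
--             if curDuration > maxDuration:
--                 maxPair = [ary[left], ary[right]]
--                 maxDuration = curDuration
--             left += 1
--         else:
--             right -= 1
--
--     return maxPair
-- ===== SOURCE B (Python) =====
-- def longestPair(ary, d):
--     limit = d - 30
--     s = sorted(ary)
--     n = len(s)
--     best = 0
--     pair = []
--     for i in range(n - 1):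
--         # hand-written bisect_right: first index where value > limit - s[i]
--         x = limit - s[i]
--         lo, hi = 0, n
--         while lo < hi:
--             mid = (lo + hi) // 2
--             if s[mid] <= x:
--                 lo = mid + 1
--             else:
--                 hi = mid
--         j = lo - 1  # rightmost index with s[j] <= x, or -1
--         if j > i and s[i] + s[j] > best:
--             best = s[i] + s[j]
--             pair = [s[i], s[j]]
--     return pair
-- ===== Notes on version B (the rewrite author's own statement) =====
-- stated objective: alternative
-- what changed: Replaces the two-pointer sweep over the sorted array by an independent per-element binary search (hand-written bisect_right) for the rightmost partner within the limit, updating the best pair with a strict comparison.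
import Mathlib
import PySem

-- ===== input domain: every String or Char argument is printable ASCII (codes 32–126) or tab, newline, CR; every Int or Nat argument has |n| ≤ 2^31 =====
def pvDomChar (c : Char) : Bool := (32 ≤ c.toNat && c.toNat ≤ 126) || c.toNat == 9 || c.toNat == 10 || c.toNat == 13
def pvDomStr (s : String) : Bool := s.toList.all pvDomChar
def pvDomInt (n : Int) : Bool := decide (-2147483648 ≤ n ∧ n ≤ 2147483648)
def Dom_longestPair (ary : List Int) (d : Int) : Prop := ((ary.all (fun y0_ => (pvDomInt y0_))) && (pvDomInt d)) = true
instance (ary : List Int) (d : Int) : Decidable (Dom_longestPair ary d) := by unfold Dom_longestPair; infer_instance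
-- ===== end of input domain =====

-- B replaces A's two-pointer sweep by an independent per-element binary search (hand-written
-- bisect_right) for the rightmost partner within the limit; same O(n log n) cost, different algorithm.

-- ===== PORT A =====
-- A's while-loop: state (left, right, maxDuration, maxPair); fuel bounds the iteration count
-- (right - left strictly decreases each step, so fuel = length suffices).
def longestPairLoop (s : List Int) (d : Int) : Nat → Int → Int → Int → List Int → List Int
  | 0, _, _, _, maxPair => maxPair
  | fuel + 1, left, right, maxDuration, maxPair =>
    if left < right then
      let curDuration := PySem.List.pyGetD s left 0 + PySem.List.pyGetD s right 0
      if curDuration ≤ d then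
        if curDuration > maxDuration then
          longestPairLoop s d fuel (left + 1) right curDuration
            [PySem.List.pyGetD s left 0, PySem.List.pyGetD s right 0]
        else
          longestPairLoop s d fuel (left + 1) right maxDuration maxPair
      else
        longestPairLoop s d fuel left (right - 1) maxDuration maxPair
    else maxPair

def longestPair (ary : List Int) (d : Int) : List Int :=
  let d' := d - 30
  let s := PySem.List.sorted ary (fun x => x)
  longestPairLoop s d' s.length 0 ((s.length : Int) - 1) 0 []

-- ===== PORT B =====
-- Source B's hand-written bisect_right loop: returns the first index with s[index] > x
-- (state (lo, hi); hi - lo strictly decreases, so fuel = length suffices).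
-- lo, hi are nonnegative Python ints throughout, so Nat and Nat division (= Python //) are exact.
def bsLoop (s : List Int) (x : Int) : Nat → Nat → Nat → Nat
  | 0, lo, _ => lo
  | fuel + 1, lo, hi =>
    if lo < hi then
      let mid := (lo + hi) / 2
      if PySem.List.pyGetD s (mid : Int) 0 ≤ x then bsLoop s x fuel (mid + 1) hi
      else bsLoop s x fuel lo mid
    else lo

-- Source B's for-loop body: j = rightmost index with s[j] <= limit - s[i], or -1
def bStep (s : List Int) (limit : Int) (st : Int × List Int) (i : Nat) : Int × List Int :=
  let j : Int := (bsLoop s (limit - PySem.List.pyGetD s (i : Int) 0) s.length 0 s.length : Int) - 1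
  if (i : Int) < j ∧ st.1 < PySem.List.pyGetD s (i : Int) 0 + PySem.List.pyGetD s j 0 then
    (PySem.List.pyGetD s (i : Int) 0 + PySem.List.pyGetD s j 0,
     [PySem.List.pyGetD s (i : Int) 0, PySem.List.pyGetD s j 0])
  else st

def longestPair_alt (ary : List Int) (d : Int) : List Int :=
  let limit := d - 30
  let s := PySem.List.sorted ary (fun x => x)
  ((List.range (s.length - 1)).foldl (bStep s limit) (0, [])).2

-- ===== PRECONDITION & SPEC =====
def Spec_longestPair (ary : List Int) (d : Int) (out : List Int) : Prop := out = longestPair_alt ary d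
instance (ary : List Int) (d : Int) (out : List Int) : Decidable (Spec_longestPair ary d out) := by unfold Spec_longestPair; infer_instance

-- ===== CLAIM (what is proved, stated in full; the proofs are below) =====
def Claim_equal_longestPair : Prop := ∀ (ary : List Int) (d : Int), Dom_longestPair ary d → Spec_longestPair ary d (longestPair ary d)

-- ===== LEMMAS AND PROOFS =====

-- sorted access is monotone (Int indices, pyGetD view)
theorem pv_mono {s : List Int} (hs : s.Pairwise (· ≤ ·)) {i j : Int}
    (h0 : 0 ≤ i) (hij : i ≤ j) (hj : j < (s.length : Int)) :
    PySem.List.pyGetD s i 0 ≤ PySem.List.pyGetD s j 0 := by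
  have h0j : 0 ≤ j := le_trans h0 hij
  rw [PySem.List.pyGetD_eq_getElem s 0 h0 (lt_of_le_of_lt hij hj),
      PySem.List.pyGetD_eq_getElem s 0 h0j hj]
  rcases eq_or_lt_of_le hij with h | h
  · simp [h]
  · exact (List.pairwise_iff_getElem.mp hs i.toNat j.toNat (by omega) (by omega) (by omega))

-- bsLoop returns an index r with lo₀ ≤ r ≤ hi₀, everything below r ≤ x, everything from r on > x
theorem bsLoop_spec {s : List Int} (hs : s.Pairwise (· ≤ ·)) (x : Int) :
    ∀ (fuel lo hi : Nat), lo ≤ hi → hi ≤ s.length → hi - lo ≤ fuel →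
    (∀ k : Nat, k < lo → PySem.List.pyGetD s (k : Int) 0 ≤ x) →
    (∀ k : Nat, hi ≤ k → k < s.length → x < PySem.List.pyGetD s (k : Int) 0) →
    lo ≤ bsLoop s x fuel lo hi ∧ bsLoop s x fuel lo hi ≤ hi ∧
      (∀ k : Nat, k < bsLoop s x fuel lo hi → PySem.List.pyGetD s (k : Int) 0 ≤ x) ∧
      (∀ k : Nat, bsLoop s x fuel lo hi ≤ k → k < s.length → x < PySem.List.pyGetD s (k : Int) 0) := by
  intro fuel
  induction fuel with
  | zero =>
    intro lo hi hlh hhn hf hlow hhigh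
    have hle : lo = hi := by omega
    simp only [bsLoop]
    exact ⟨le_refl _, by omega, hlow, fun k hk hkn => hhigh k (by omega) hkn⟩
  | succ fuel ih =>
    intro lo hi hlh hhn hf hlow hhigh
    by_cases h : lo < hi
    · have hdm := Nat.div_add_mod (lo + hi) 2
      have hmod := Nat.mod_lt (lo + hi) (by norm_num : 0 < 2)
      have hmid1 : lo ≤ (lo + hi) / 2 := by omega
      have hmid2 : (lo + hi) / 2 < hi := by omega
      by_cases hc : PySem.List.pyGetD s (((lo + hi) / 2 : Nat) : Int) 0 ≤ x
      · have hres : bsLoop s x (fuel + 1) lo hi = bsLoop s x fuel ((lo + hi) / 2 + 1) hi := by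
          simp only [bsLoop, if_pos h, if_pos hc]
        rw [hres]
        have := ih ((lo + hi) / 2 + 1) hi (by omega) hhn (by omega)
          (fun k hk => le_trans
            (pv_mono hs (by omega) (by exact_mod_cast (by omega : (k : Int) ≤ ((lo + hi) / 2 : Nat)))
              (by exact_mod_cast (by omega : ((lo + hi) / 2 : Nat) < s.length)))
            hc)
          hhigh
        exact ⟨by omega, this.2.1, this.2.2.1, this.2.2.2⟩
      · have hres : bsLoop s x (fuel + 1) lo hi = bsLoop s x fuel lo ((lo + hi) / 2) := by
          simp only [bsLoop, if_pos h, if_neg hc]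
        rw [hres]
        rw [not_le] at hc
        have := ih lo ((lo + hi) / 2) hmid1 (by omega) (by omega) hlow
          (fun k hk hkn => lt_of_lt_of_le hc
            (pv_mono hs (by omega) (by exact_mod_cast hk) (by exact_mod_cast hkn)))
        exact ⟨this.1, by omega, this.2.2.1, this.2.2.2⟩
    · have hle : lo = hi := by omega
      simp only [bsLoop, if_neg h]
      exact ⟨le_refl _, by omega, hlow, fun k hk hkn => hhigh k (by omega) hkn⟩

-- a fold whose step fixes every state is the identity
theorem pv_foldl_fix {β : Type} (f : β → Nat → β) :
    ∀ (L : List Nat) (st : β), (∀ i ∈ L, ∀ st', f st' i = st') → L.foldl f st = st := by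
  intro L
  induction L with
  | nil => intro st _; rfl
  | cons a L ihL =>
    intro st h
    rw [List.foldl_cons, h a (List.mem_cons_self) st]
    exact ihL st (fun i hi st' => h i (List.mem_cons_of_mem a hi) st')

-- once the two pointers have met (r ≤ l), every remaining B-iteration is a no-op
theorem pv_noop {s : List Int} (hs : s.Pairwise (· ≤ ·)) (d l r : Int)
    (hl0 : 0 ≤ l) (hln : l ≤ (s.length : Int) - 1) (hrl : r ≤ l)
    (hinv : ∀ k : Nat, r < (k : Int) → k < s.length →
        d < PySem.List.pyGetD s l 0 + PySem.List.pyGetD s (k : Int) 0) :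
    ∀ st : Int × List Int, (List.range' l.toNat (s.length - 1 - l.toNat)).foldl (bStep s d) st = st := by
  intro st
  apply pv_foldl_fix
  intro i hi st'
  rw [List.mem_range'_1] at hi
  have hi1 : l.toNat ≤ i := hi.1
  have hi2 : i < s.length - 1 := by omega
  obtain ⟨_, hbrn, hbelow, habove⟩ := bsLoop_spec hs (d - PySem.List.pyGetD s (i : Int) 0)
    s.length 0 s.length (Nat.zero_le _) (le_refl _) (by omega)
    (fun k hk => absurd hk (Nat.not_lt_zero k)) (fun k h1 h2 => absurd h2 (by omega))
  have hbr : bsLoop s (d - PySem.List.pyGetD s (i : Int) 0) s.length 0 s.length ≤ i + 1 := by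
    by_contra hgt
    rw [not_le] at hgt
    have h2 := hbelow (i + 1) (by omega)
    have h3 := hinv (i + 1) (by omega) (by omega)
    have h4 : PySem.List.pyGetD s l 0 ≤ PySem.List.pyGetD s (i : Int) 0 :=
      pv_mono hs hl0 (by omega) (by omega)
    linarith
  simp only [bStep]
  rw [if_neg]
  intro hcon
  have := hcon.1
  omega

-- A's loop equals B's fold over the remaining indices, under the two-pointer invariant
theorem loop_eq_fold {s : List Int} (hs : s.Pairwise (· ≤ ·)) (d : Int) :
    ∀ (fuel : Nat) (l r maxD : Int) (maxPair : List Int),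
    0 ≤ l → l ≤ (s.length : Int) - 1 → 0 ≤ r → r ≤ (s.length : Int) - 1 →
    (r - l).toNat ≤ fuel →
    (∀ k : Nat, r < (k : Int) → k < s.length →
        d < PySem.List.pyGetD s l 0 + PySem.List.pyGetD s (k : Int) 0) →
    longestPairLoop s d fuel l r maxD maxPair =
      ((List.range' l.toNat (s.length - 1 - l.toNat)).foldl (bStep s d) (maxD, maxPair)).2 := by
  intro fuel
  induction fuel with
  | zero =>
    intro l r maxD maxPair hl0 hln hr0 hrn hf hinv
    simp only [longestPairLoop]
    rw [pv_noop hs d l r hl0 hln (by omega) hinv (maxD, maxPair)]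
  | succ fuel ih =>
    intro l r maxD maxPair hl0 hln hr0 hrn hf hinv
    by_cases hlr : l < r
    · by_cases hc : PySem.List.pyGetD s l 0 + PySem.List.pyGetD s r 0 ≤ d
      · -- at i = l.toNat, B's binary search finds exactly j = r
        obtain ⟨_, hbrn, hbelow, habove⟩ := bsLoop_spec hs (d - PySem.List.pyGetD s l 0)
          s.length 0 s.length (Nat.zero_le _) (le_refl _) (by omega)
          (fun k hk => absurd hk (Nat.not_lt_zero k)) (fun k h1 h2 => absurd h2 (by omega))
        have hge : r.toNat < bsLoop s (d - PySem.List.pyGetD s l 0) s.length 0 s.length := by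
          by_contra hle
          rw [not_lt] at hle
          have h1 := habove r.toNat hle (by omega)
          rw [show ((r.toNat : Nat) : Int) = r from Int.toNat_of_nonneg hr0] at h1
          linarith
        have hle2 : bsLoop s (d - PySem.List.pyGetD s l 0) s.length 0 s.length ≤ r.toNat + 1 := by
          by_contra hgt
          rw [not_le] at hgt
          have h2 := hbelow (r.toNat + 1) (by omega)
          have h3 := hinv (r.toNat + 1) (by omega) (by omega)
          linarith
        have hbr : bsLoop s (d - PySem.List.pyGetD s l 0) s.length 0 s.length = r.toNat + 1 := by
          omega
        have hcast : ((l.toNat : Nat) : Int) = l := Int.toNat_of_nonneg hl0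
        have hstep : ∀ st : Int × List Int, bStep s d st l.toNat =
            if st.1 < PySem.List.pyGetD s l 0 + PySem.List.pyGetD s r 0 then
              (PySem.List.pyGetD s l 0 + PySem.List.pyGetD s r 0,
               [PySem.List.pyGetD s l 0, PySem.List.pyGetD s r 0])
            else st := by
          intro st
          simp only [bStep, hcast, hbr]
          rw [show ((r.toNat + 1 : Nat) : Int) - 1 = r from by omega]
          simp [hlr]
        have hsplit : s.length - 1 - l.toNat = (s.length - 1 - (l.toNat + 1)) + 1 := by omega
        rw [hsplit, List.range'_succ, List.foldl_cons, hstep (maxD, maxPair)]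
        have hto : (l + 1).toNat = l.toNat + 1 := by omega
        have hinv' : ∀ k : Nat, r < (k : Int) → k < s.length →
            d < PySem.List.pyGetD s (l + 1) 0 + PySem.List.pyGetD s (k : Int) 0 := by
          intro k hk hkn
          have := hinv k hk hkn
          have hm2 : PySem.List.pyGetD s l 0 ≤ PySem.List.pyGetD s (l + 1) 0 :=
            pv_mono hs hl0 (by omega) (by omega)
          linarith
        by_cases hm : PySem.List.pyGetD s l 0 + PySem.List.pyGetD s r 0 > maxD
        · simp only [longestPairLoop, if_pos hlr, if_pos hc, if_pos hm]
          rw [ih (l + 1) r _ _ (by omega) (by omega) hr0 hrn (by omega) hinv', hto]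
        · simp only [longestPairLoop, if_pos hlr, if_pos hc, if_neg hm]
          rw [ih (l + 1) r _ _ (by omega) (by omega) hr0 hrn (by omega) hinv', hto]
      · -- overshoot: A moves the right pointer; B's fold expression is unchanged
        simp only [longestPairLoop, if_pos hlr, if_neg hc]
        apply ih l (r - 1) maxD maxPair hl0 hln (by omega) (by omega) (by omega)
        intro k hk hkn
        by_cases hkr : r < (k : Int)
        · exact hinv k hkr hkn
        · have hkr' : (k : Int) = r := by omega
          rw [hkr']
          linarith [not_le.mp hc]
    · simp only [longestPairLoop, if_neg hlr]
      rw [pv_noop hs d l r hl0 hln (by omega) hinv (maxD, maxPair)]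

-- ===== VERDICT (by name: the statement is the Claim_ definition above) =====
theorem longestPair_spec : Claim_equal_longestPair := by
  intro ary d _
  unfold Spec_longestPair longestPair longestPair_alt
  have hs : (PySem.List.sorted ary (fun x => x)).Pairwise (· ≤ ·) :=
    PySem.List.sorted_pairwise ary (fun x => x)
  rcases Nat.eq_zero_or_pos (PySem.List.sorted ary (fun x => x)).length with h0 | hpos
  · rw [List.length_eq_zero_iff] at h0
    simp [h0, longestPairLoop]
  · rw [loop_eq_fold hs (d - 30) (PySem.List.sorted ary (fun x => x)).length 0
      ((PySem.List.sorted ary (fun x => x)).length - 1) 0 [] (le_refl 0) (by omega) (by omega)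
      (le_refl _) (by omega) (by intro k hk hkn; omega)]
    simp only [List.range_eq_range']
    norm_num
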